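-- pv_equiv track=rewrite | github.com/rajendrapandey95/LeetCode | 2025/Dec 25/2147. Number of Ways to Divide a Long Corridor.py | numberOfWays
-- ===== SOURCE A (Python) =====
-- def numberOfWays(corridor: str) -> int:
--     MOD = 10**9 + 7
--
--     seats = [i for i, c in enumerate(corridor) if c == 'S']
--     if len(seats) % 2 != 0 or len(seats) == 0:
--         return 0
--
--     ways = 1
--     for i in range(1, len(seats) // 2):
--         left = seats[2*i - 1]
--         right = seats[2*i]
--         ways = (ways * (right - left)) % MOD
--
--     return ways
-- ===== SOURCE B (Python) =====
-- def numberOfWays(corridor: str) -> int: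
--     MOD = 10**9 + 7
--     ways = 1
--     seen = 0
--     gap = 0  # 0 = not counting; else cells since the last even-completing seat
--     for c in corridor:
--         if c == 'S':
--             if gap:
--                 ways = ways * gap % MOD
--             seen += 1
--             gap = 1 if seen % 2 == 0 else 0
--         elif gap:
--             gap += 1
--     if seen == 0 or seen % 2:
--         return 0
--     return ways
-- ===== Notes on version B (the rewrite author's own statement) =====
-- stated objective: faster
-- what changed: Replaces A's two-phase approach (build the full list of seat indices via enumerate, then loop over index pairs seats[2i-1],seats[2i]) with a single character pass maintaining a running seat count and gap counter, multiplying the answer by the gap at each pair-boundary seat; no index list is materialised.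
import Mathlib
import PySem

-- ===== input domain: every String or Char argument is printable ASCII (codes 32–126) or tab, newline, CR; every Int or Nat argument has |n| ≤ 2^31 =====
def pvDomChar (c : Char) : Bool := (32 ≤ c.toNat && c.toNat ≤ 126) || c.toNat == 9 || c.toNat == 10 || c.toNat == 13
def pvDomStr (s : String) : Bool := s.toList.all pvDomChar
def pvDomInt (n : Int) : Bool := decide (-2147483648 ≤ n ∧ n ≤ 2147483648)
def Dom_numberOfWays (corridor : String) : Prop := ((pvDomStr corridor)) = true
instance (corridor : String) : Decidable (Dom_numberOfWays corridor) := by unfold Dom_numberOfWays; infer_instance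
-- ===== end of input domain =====

-- B replaces A's seat-index list and pair loop by a single character pass with a running
-- seat count and gap counter, avoiding the intermediate index list (measured faster by a constant factor).

-- ===== PORT A =====
def numberOfWays (corridor : String) : Int :=
  let M : Int := 10 ^ 9 + 7
  let seats : List Int :=
    (PySem.List.enumerate corridor.toList 0).filterMap
      (fun ic => if ic.2 = 'S' then some ic.1 else none)
  if seats.length % 2 ≠ 0 ∨ seats.length = 0 then 0
  else
    (PySem.List.pyRange 1 (PySem.Int.floordiv (seats.length : Int) 2) 1).foldl
      (fun ways i =>
        let left := PySem.List.pyGetD seats (2 * i - 1) 0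
        let right := PySem.List.pyGetD seats (2 * i) 0
        PySem.Int.mod (ways * (right - left)) M) 1

-- ===== PORT B =====
-- the body of B's for-loop (ways, seen, gap as in Source B)
def bStep (st : Int × Int × Int) (c : Char) : Int × Int × Int :=
  let (ways, seen, gap) := st
  if c = 'S' then
    let ways := if gap ≠ 0 then PySem.Int.mod (ways * gap) (10 ^ 9 + 7) else ways
    let seen := seen + 1
    (ways, seen, if PySem.Int.mod seen 2 = 0 then 1 else 0)
  else if gap ≠ 0 then (ways, seen, gap + 1) else (ways, seen, gap)

def numberOfWays_alt (corridor : String) : Int :=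
  let r := corridor.toList.foldl bStep (1, 0, 0)
  if r.2.1 = 0 ∨ PySem.Int.mod r.2.1 2 ≠ 0 then 0 else r.1

-- ===== PRECONDITION & SPEC =====
def Spec_numberOfWays (corridor : String) (out : Int) : Prop := out = numberOfWays_alt corridor
instance (corridor : String) (out : Int) : Decidable (Spec_numberOfWays corridor out) := by unfold Spec_numberOfWays; infer_instance

-- ===== CLAIM (what is proved, stated in full; the proofs are below) =====
def Claim_equal_numberOfWays : Prop := ∀ (corridor : String), Dom_numberOfWays corridor → Spec_numberOfWays corridor (numberOfWays corridor)

-- ===== LEMMAS AND PROOFS =====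

-- seat positions of l, counted from offset n
def seatsPos (n : Int) : List Char → List Int
  | [] => []
  | c :: r => if c = 'S' then n :: seatsPos (n + 1) r else seatsPos (n + 1) r

-- the gaps seats[2]-seats[1], seats[4]-seats[3], … of (seats.drop 1) paired up
def pairGaps : List Int → List Int
  | a :: b :: r => (b - a) :: pairGaps r
  | _ => []

def mulFold (w : Int) (gs : List Int) : Int :=
  gs.foldl (fun a d => PySem.Int.mod (a * d) (10 ^ 9 + 7)) w

-- the list of gap values B multiplies into `ways`, from state (seen = s, gap = g)
def gapsL (s g : Int) : List Char → List Int
  | [] => []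
  | c :: r =>
    if c = 'S' then
      if g ≠ 0 then g :: gapsL (s + 1) (if PySem.Int.mod (s + 1) 2 = 0 then 1 else 0) r
      else gapsL (s + 1) (if PySem.Int.mod (s + 1) 2 = 0 then 1 else 0) r
    else gapsL s (if g ≠ 0 then g + 1 else g) r

def headCase (n g : Int) : List Int → List Int
  | [] => []
  | p :: rest => (g + (p - n)) :: pairGaps rest

lemma mod_two (a : Int) : PySem.Int.mod a 2 = a % 2 :=
  PySem.Int.mod_eq_emod_of_pos (by norm_num)

lemma seats_eq (l : List Char) : ∀ n : Int,
    (PySem.List.enumerate l n).filterMap (fun ic => if ic.2 = 'S' then some ic.1 else none)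
      = seatsPos n l := by
  induction l with
  | nil => intro n; simp [PySem.List.enumerate_nil, seatsPos]
  | cons c r ih =>
    intro n
    by_cases h : c = 'S' <;>
      simp [PySem.List.enumerate_cons, List.filterMap_cons, seatsPos, h, ih]

lemma seatsPos_length (l : List Char) : ∀ n : Int,
    (seatsPos n l).length = l.countP (· == 'S') := by
  induction l with
  | nil => intro n; simp [seatsPos]
  | cons c r ih =>
    intro n
    by_cases h : c = 'S' <;> simp [seatsPos, h, ih, List.countP_cons]

lemma pairGaps_short (xs : List Int) (h : xs.length ≤ 1) : pairGaps xs = [] := by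
  match xs with
  | [] => rfl
  | [a] => rfl
  | a :: b :: r => simp at h

lemma mulFold_cons (w d : Int) (gs : List Int) :
    mulFold w (d :: gs) = mulFold (PySem.Int.mod (w * d) (10 ^ 9 + 7)) gs := rfl

-- B's fold: first component is the product of the emitted gaps, second is seen count
lemma foldl_bStep (l : List Char) : ∀ w s g : Int,
    (l.foldl bStep (w, s, g)).1 = mulFold w (gapsL s g l) ∧
    (l.foldl bStep (w, s, g)).2.1 = s + (l.countP (· == 'S') : Int) := by
  induction l with
  | nil => intro w s g; simp [mulFold, gapsL]
  | cons c r ih =>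
    intro w s g
    by_cases hc : c = 'S' <;> by_cases hg : g ≠ 0 <;>
      simp [List.foldl_cons, bStep, gapsL, hc, hg, ih, mulFold_cons, List.countP_cons] <;>
      push_cast <;> ring

-- the two running modes of B's gap counter, expressed via the seat positions
lemma gapsL_run (l : List Char) : ∀ n : Int,
    (∀ s : Int, PySem.Int.mod s 2 = 1 → gapsL s 0 l = pairGaps (seatsPos n l)) ∧
    (∀ s g : Int, PySem.Int.mod s 2 = 0 → 1 ≤ g →
      gapsL s g l = headCase n g (seatsPos n l)) := by
  induction l with
  | nil => intro n; constructor <;> intros <;> simp [gapsL, seatsPos, pairGaps, headCase]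
  | cons c r ih =>
    intro n
    constructor
    · -- odd mode: waiting for the pair-opening seat
      intro s hs
      by_cases hc : c = 'S'
      · have h1 : PySem.Int.mod (s + 1) 2 = 0 := by
          rw [mod_two] at hs ⊢; omega
        have heven := ((ih (n + 1)).2) (s + 1) 1 h1 (le_refl 1)
        simp only [gapsL, seatsPos, hc, if_pos rfl, h1, if_true, ite_true]
        rw [if_neg (by simp : ¬((0:Int) ≠ 0)), heven]
        cases hsp : seatsPos (n + 1) r with
        | nil => simp [headCase, pairGaps]
        | cons p rest =>
          simp only [headCase, pairGaps]
          congr 1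
          ring
      · simp only [gapsL, seatsPos, hc, if_neg hc, ite_false]
        rw [if_neg (by simp : ¬((0:Int) ≠ 0))]
        exact ((ih (n + 1)).1) s hs
    · -- even mode: counting the gap g since the pair-closing seat
      intro s g hs hg
      have hgne : g ≠ 0 := by omega
      by_cases hc : c = 'S'
      · have h1 : PySem.Int.mod (s + 1) 2 = 1 := by
          rw [mod_two] at hs ⊢; omega
        have hodd := ((ih (n + 1)).1) (s + 1) h1
        simp only [gapsL, seatsPos, hc, if_pos rfl, if_pos hgne, h1, ite_true]
        rw [if_neg (by norm_num : ¬((1:Int) = 0)), hodd]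
        simp only [headCase]
        congr 1
        ring
      · simp only [gapsL, seatsPos, hc, if_neg hc, if_pos hgne, ite_false]
        rw [((ih (n + 1)).2) s (g + 1) hs (by omega)]
        cases hsp : seatsPos (n + 1) r with
        | nil => simp [headCase]
        | cons p rest =>
          simp only [headCase]
          congr 1
          ring

-- from the initial state (seen = 0, gap = 0), B's emitted gaps are the pair gaps of the seats after the first
lemma gapsL_start (l : List Char) : ∀ n : Int,
    gapsL 0 0 l = pairGaps ((seatsPos n l).drop 1) := by
  induction l with
  | nil => intro n; simp [gapsL, seatsPos, pairGaps]
  | cons c r ih =>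
    intro n
    by_cases hc : c = 'S'
    · have h1 : PySem.Int.mod (0 + 1 : Int) 2 = 1 := by rw [mod_two]; decide
      simp only [gapsL, seatsPos, hc, if_pos rfl, h1, if_true, ite_true, List.drop_succ_cons,
        List.drop_zero]
      rw [if_neg (by norm_num : ¬((1:Int) = 0)), if_neg (by simp : ¬((0:Int) ≠ 0))]
      exact ((gapsL_run r (n + 1)).1) (0 + 1) (by rw [mod_two]; decide)
    · simp only [gapsL, seatsPos, hc, if_neg hc, ite_false]
      rw [if_neg (by simp : ¬((0:Int) ≠ 0))]
      exact ih (n + 1)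

-- A's index loop over the seat list, unrolled into pairGaps of the dropped list
lemma Aloop (seats : List Int) (k : Nat) (hk : seats.length = 2 * k) :
    ∀ (m j : Nat) (w : Int), j + m = k → 1 ≤ j →
      (PySem.List.pyRange (j : Int) (k : Int) 1).foldl
        (fun ways i =>
          PySem.Int.mod
            (ways * (PySem.List.pyGetD seats (2 * i) 0 - PySem.List.pyGetD seats (2 * i - 1) 0))
            (10 ^ 9 + 7)) w
      = mulFold w (pairGaps (seats.drop (2 * j - 1))) := by
  intro m
  induction m with
  | zero =>
    intro j w hjk hj
    have hjk' : j = k := by omega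
    rw [PySem.List.pyRange_one_eq_nil (by exact_mod_cast le_of_eq hjk'.symm)]
    have hlen : (seats.drop (2 * j - 1)).length ≤ 1 := by
      rw [List.length_drop, hk]; omega
    rw [pairGaps_short _ hlen]
    rfl
  | succ m ih =>
    intro j w hjk hj
    have hjltk : j < k := by omega
    rw [PySem.List.pyRange_one_cons (by exact_mod_cast hjltk)]
    simp only [List.foldl_cons]
    have hcast : ((j : Int) + 1) = ((j + 1 : Nat) : Int) := by push_cast; ring
    rw [hcast]
    rw [ih (j + 1) _ (by omega) (by omega)]
    -- identify the two indexed elements and peel two elements off the drop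
    have hb1 : 2 * j - 1 < seats.length := by omega
    have hb2 : 2 * j < seats.length := by omega
    have hd1 : seats.drop (2 * j - 1) = seats[2 * j - 1] :: seats.drop (2 * j) := by
      have e1 : 2 * j - 1 + 1 = 2 * j := by omega
      rw [List.drop_eq_getElem_cons hb1, e1]
    have hd2 : seats.drop (2 * j) = seats[2 * j] :: seats.drop (2 * j + 1) := by
      rw [List.drop_eq_getElem_cons hb2]
    have hg1 : PySem.List.pyGetD seats (2 * (j : Int) - 1) 0 = seats[2 * j - 1] := by
      have : (2 * (j : Int) - 1) = ((2 * j - 1 : Nat) : Int) := by push_cast [Nat.cast_sub]; omega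
      rw [this, PySem.List.pyGetD_natCast]
      exact List.getD_eq_getElem _ _ hb1
    have hg2 : PySem.List.pyGetD seats (2 * (j : Int)) 0 = seats[2 * j] := by
      have : (2 * (j : Int)) = ((2 * j : Nat) : Int) := by push_cast; ring
      rw [this, PySem.List.pyGetD_natCast]
      exact List.getD_eq_getElem _ _ hb2
    rw [hd1, hd2, hg1, hg2]
    have hdrop : 2 * (j + 1) - 1 = 2 * j + 1 := by omega
    rw [hdrop]
    simp only [pairGaps, mulFold_cons]

-- ===== VERDICT (by name: the statement is the Claim_ definition above) =====
theorem numberOfWays_spec : Claim_equal_numberOfWays := by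
  intro corridor _
  unfold Spec_numberOfWays numberOfWays numberOfWays_alt
  simp only [seats_eq corridor.toList 0]
  have hB := foldl_bStep corridor.toList 1 0 0
  have hcnt := seatsPos_length corridor.toList 0
  set l := corridor.toList with hl
  set cnt := l.countP (· == 'S') with hc
  by_cases hz : cnt % 2 ≠ 0 ∨ cnt = 0
  · rw [if_pos (by rw [hcnt]; exact hz)]
    rw [if_pos (by
      rw [hB.2, mod_two]
      omega)]
  · push_neg at hz
    rw [if_neg (by rw [hcnt]; push_neg; exact hz)]
    rw [if_neg (by
      rw [hB.2, mod_two]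
      push_neg
      omega)]
    rw [hB.1]
    obtain ⟨heven, hne⟩ := hz
    set seats := seatsPos 0 l with hs
    obtain ⟨k, hk⟩ : ∃ k, seats.length = 2 * k := ⟨cnt / 2, by omega⟩
    have hk1 : 1 ≤ k := by omega
    have hfd : PySem.Int.floordiv (seats.length : Int) 2 = (k : Int) := by
      rw [hk]; push_cast
      rw [PySem.Int.floordiv_eq_ediv_of_pos (by norm_num)]
      omega
    rw [hfd]
    have hA := Aloop seats k hk (k - 1) 1 1 (by omega) (le_refl 1)
    simp only [Nat.cast_one] at hA
    rw [show 2 * 1 - 1 = 1 from rfl] at hA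
    rw [hA, gapsL_start l 0]
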